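-- pv_equiv track=rewrite | github.com/ismagt/demo-app-ML | app.py | resolve_selected_token
-- ===== SOURCE A (Python) =====
-- def resolve_selected_token(tokens: list, typed: str, fallback: str) -> str:
--     """Pick token by: exact match first, else contains match, else fallback."""
--     if typed is None:
--         return fallback
--     t = str(typed).strip()
--     if t == "":
--         return fallback
--
--     # exact
--     for tok in tokens:
--         if tok == t:
--             return tok
--
--     # contains
--     cand = [tok for tok in tokens if t in tok]
--     if len(cand) > 0:
--         return cand[0]
--
--     return fallback
-- ===== SOURCE B (Python) =====
-- def resolve_selected_token(tokens: list, typed: str, fallback: str) -> str: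
--     """Pick token by: exact match first, else contains match, else fallback.
--     Single pass keeping the first exact and first containing token."""
--     if typed is None:
--         return fallback
--     t = str(typed).strip()
--     if t == "":
--         return fallback
--     first_exact = None
--     first_contains = None
--     for tok in tokens:
--         if first_exact is None and tok == t:
--             first_exact = tok
--         if first_contains is None and t in tok:
--             first_contains = tok
--     if first_exact is not None:
--         return first_exact
--     if first_contains is not None:
--         return first_contains
--     return fallback
-- ===== Notes on version B (the rewrite author's own statement) =====
-- stated objective: simpler
-- what changed: Replaces A's two separate passes (an exact-match scan plus a full contains-filter building an intermediate list) with one loop that keeps two first-hit sentinels and no intermediate list.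
import Mathlib
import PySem

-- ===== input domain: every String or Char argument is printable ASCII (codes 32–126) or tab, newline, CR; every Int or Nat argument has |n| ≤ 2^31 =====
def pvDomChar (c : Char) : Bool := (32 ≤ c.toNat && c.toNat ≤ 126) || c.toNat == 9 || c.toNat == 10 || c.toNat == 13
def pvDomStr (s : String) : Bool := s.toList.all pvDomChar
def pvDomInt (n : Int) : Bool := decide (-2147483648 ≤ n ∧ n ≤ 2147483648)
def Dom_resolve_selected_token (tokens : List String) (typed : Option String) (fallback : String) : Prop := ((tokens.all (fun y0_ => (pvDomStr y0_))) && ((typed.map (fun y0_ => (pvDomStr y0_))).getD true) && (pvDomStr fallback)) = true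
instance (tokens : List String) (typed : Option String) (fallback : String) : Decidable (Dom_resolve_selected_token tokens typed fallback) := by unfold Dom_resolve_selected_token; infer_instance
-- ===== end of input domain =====

-- B replaces A's two passes (exact scan + contains filter list) with one loop keeping two first-hit sentinels; objective: simpler.

-- ===== PORT A =====
def resolve_selected_token (tokens : List String) (typed : Option String) (fallback : String) : String :=
  match typed with
  | none => fallback
  | some typedS =>
    let t := PySem.Str.strip typedS
    if t = "" then fallback
    else
      match tokens.find? (fun tok => tok == t) with
      | some tok => tok
      | none =>
        let cand := tokens.filter (fun tok => PySem.Str.isIn t tok)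
        if cand.length > 0 then cand.headD fallback else fallback

-- ===== PORT B =====
def pvStep (t : String) (acc : Option String × Option String) (tok : String) : Option String × Option String :=
  ((if acc.1.isNone && tok == t then some tok else acc.1),
   (if acc.2.isNone && PySem.Str.isIn t tok then some tok else acc.2))

def resolve_selected_token_alt (tokens : List String) (typed : Option String) (fallback : String) : String :=
  match typed with
  | none => fallback
  | some typedS =>
    let t := PySem.Str.strip typedS
    if t = "" then fallback
    else
      let r := tokens.foldl (pvStep t) (none, none)
      match r.1 with
      | some x => x
      | none =>
        match r.2 with
        | some y => y
        | none => fallback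

-- ===== PRECONDITION & SPEC =====
def Spec_resolve_selected_token (tokens : List String) (typed : Option String) (fallback : String) (out : String) : Prop := out = resolve_selected_token_alt tokens typed fallback
instance (tokens : List String) (typed : Option String) (fallback : String) (out : String) : Decidable (Spec_resolve_selected_token tokens typed fallback out) := by unfold Spec_resolve_selected_token; infer_instance

-- ===== CLAIM (what is proved, stated in full; the proofs are below) =====
def Claim_equal_resolve_selected_token : Prop := ∀ (tokens : List String) (typed : Option String) (fallback : String), Dom_resolve_selected_token tokens typed fallback → Spec_resolve_selected_token tokens typed fallback (resolve_selected_token tokens typed fallback)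

-- ===== LEMMAS AND PROOFS =====

theorem pvFold_fst (t : String) (l : List String) (acc : Option String × Option String) :
    (l.foldl (pvStep t) acc).1 = acc.1.or (l.find? (fun tok => tok == t)) := by
  induction l generalizing acc with
  | nil => simp
  | cons x xs ih =>
    simp only [List.foldl_cons, ih, List.find?]
    cases h : acc.1 with
    | some v => simp [pvStep, h]
    | none => cases hx : (x == t) <;> simp [pvStep, h, hx]

theorem pvFold_snd (t : String) (l : List String) (acc : Option String × Option String) :
    (l.foldl (pvStep t) acc).2 = acc.2.or (l.find? (fun tok => PySem.Str.isIn t tok)) := by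
  induction l generalizing acc with
  | nil => simp
  | cons x xs ih =>
    simp only [List.foldl_cons, ih, List.find?]
    cases h : acc.2 with
    | some v => simp [pvStep, h]
    | none => cases hx : PySem.Chars.isIn t.toList x.toList <;>
        simp [pvStep, h, hx]

theorem pvFilter_head (p : String → Bool) (l : List String) (d : String) :
    (if (l.filter p).length > 0 then (l.filter p).headD d else d)
      = (match l.find? p with | some y => y | none => d) := by
  induction l with
  | nil => simp
  | cons x xs ih =>
    cases h : p x with
    | true => simp [List.find?, h]
    | false =>
      rw [List.filter_cons, List.find?, h]
      simpa using ih

theorem resolve_eq (tokens : List String) (typed : Option String) (fallback : String) :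
    resolve_selected_token tokens typed fallback = resolve_selected_token_alt tokens typed fallback := by
  unfold resolve_selected_token resolve_selected_token_alt
  cases typed with
  | none => rfl
  | some s =>
    simp only
    split
    · rfl
    · rw [show (tokens.foldl (pvStep (PySem.Str.strip s)) (none, none)) =
        ((tokens.foldl (pvStep (PySem.Str.strip s)) (none, none)).1,
         (tokens.foldl (pvStep (PySem.Str.strip s)) (none, none)).2) from rfl,
        pvFold_fst, pvFold_snd]
      simp only [Option.or]
      cases hf : tokens.find? (fun tok => tok == PySem.Str.strip s) with
      | some x => simp
      | none =>
        simp only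
        exact pvFilter_head _ tokens fallback

-- ===== VERDICT (by name: the statement is the Claim_ definition above) =====
theorem resolve_selected_token_spec : Claim_equal_resolve_selected_token := by
  intro tokens typed fallback _
  unfold Spec_resolve_selected_token
  exact resolve_eq tokens typed fallback
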